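-- pv_equiv track=rewrite | github.com/mixdevdev/hackerPython | missing_character.py | missingCharacters
-- ===== SOURCE A (Python) =====
-- import string
--
-- def missingCharacters(s):
--     all_number=[]
--     all_aphabet=[]
--     temp_list=[]
--     final=''
--
--     alphabet = string.ascii_lowercase
--     for i in range (0,10):
--         all_number.append(str(i))
--     # print (type(all_number[0]))
--     for i in alphabet:
--         all_aphabet.append(i)
--     # import pdb; pdb.set_trace()
--     for i in s:
--         if i in all_aphabet:
--             all_aphabet.remove(i)
--         if i in all_number:
--             all_number.remove(i)
--     # print (temp_list)
--
--
--     b=all_number+all_aphabet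
--     print (all_number)
--     final=''.join(str(item) for item in b)
--     return final
-- ===== SOURCE B (Python) =====
-- import string
--
-- def missingCharacters(s):
--     seen = set(s)
--     print([d for d in string.digits if d not in seen])
--     return ''.join(c for c in string.digits + string.ascii_lowercase if c not in seen)
-- ===== Notes on version B (the rewrite author's own statement) =====
-- stated objective: simpler
-- what changed: Instead of materialising digit/letter lists and removing each character of s from them (a linear list scan per removal), B builds a set of s's characters once and filters the fixed 36-character alphabet by membership.
import Mathlib
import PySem

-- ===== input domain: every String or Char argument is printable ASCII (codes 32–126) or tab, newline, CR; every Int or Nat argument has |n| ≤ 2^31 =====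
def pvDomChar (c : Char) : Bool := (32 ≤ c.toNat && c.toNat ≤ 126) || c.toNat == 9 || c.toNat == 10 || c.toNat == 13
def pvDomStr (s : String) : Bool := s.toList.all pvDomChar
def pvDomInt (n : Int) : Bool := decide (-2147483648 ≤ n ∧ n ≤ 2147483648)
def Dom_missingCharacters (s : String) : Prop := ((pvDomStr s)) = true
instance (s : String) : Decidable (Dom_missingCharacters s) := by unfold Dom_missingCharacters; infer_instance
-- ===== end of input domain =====

-- B replaces A's remove-from-lists loop by a single membership filter of the fixed
-- digits+lowercase alphabet against the set of s's characters (simpler decomposition).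
-- A also prints the remaining-digits list; B prints the same list (return value is what is proved).

-- ===== PORT A =====
-- 'if i in lst: lst.remove(i)': list.remove removes the first occurrence (ValueError impossible under the guard)
def pvRmA (l : List Char) (c : Char) : List Char :=
  if c ∈ l then (PySem.List.remove? l c).getD l else l

def missingCharacters (s : String) : String :=
  -- all_number: for i in range(0,10): append(str(i)) — str(i) is the single digit character
  let all_number : List Char := (PySem.List.pyRange 0 10 1).map (fun i => Char.ofNat (48 + i.toNat))
  -- all_aphabet: for i in string.ascii_lowercase: append(i)
  let all_aphabet : List Char := "abcdefghijklmnopqrstuvwxyz".toList.foldl (fun acc c => acc ++ [c]) []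
  -- for i in s: remove i from each list if present (alphabet checked first, then numbers)
  let st := s.toList.foldl (fun (st : List Char × List Char) c => (pvRmA st.1 c, pvRmA st.2 c))
      (all_number, all_aphabet)
  -- b = all_number + all_aphabet; ''.join(...)
  String.mk (st.1 ++ st.2)

-- ===== PORT B =====
def missingCharacters_alt (s : String) : String :=
  let seen : PySem.Set Char := PySem.Set.ofList s.toList
  String.mk ("0123456789abcdefghijklmnopqrstuvwxyz".toList.filter
    (fun c => !(PySem.Set.contains seen c)))

-- ===== PRECONDITION & SPEC =====
def Spec_missingCharacters (s : String) (out : String) : Prop := out = missingCharacters_alt s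
instance (s : String) (out : String) : Decidable (Spec_missingCharacters s out) := by unfold Spec_missingCharacters; infer_instance

-- ===== CLAIM (what is proved, stated in full; the proofs are below) =====
def Claim_equal_missingCharacters : Prop := ∀ (s : String), Dom_missingCharacters s → Spec_missingCharacters s (missingCharacters s)

-- ===== LEMMAS AND PROOFS =====

theorem pvRmA_eq_erase (l : List Char) (c : Char) : pvRmA l c = l.erase c := by
  unfold pvRmA
  by_cases h : c ∈ l
  · rw [PySem.List.remove?_eq_some_erase (h := h)]; simp [h]
  · simp [h, List.erase_of_not_mem h]

theorem pvPairFold (cs : List Char) (n a : List Char) :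
    cs.foldl (fun (st : List Char × List Char) c => (pvRmA st.1 c, pvRmA st.2 c)) (n, a)
      = (cs.foldl pvRmA n, cs.foldl pvRmA a) := by
  induction cs generalizing n a with
  | nil => rfl
  | cons c cs ih => simp [List.foldl, ih]

theorem pvFoldErase (cs : List Char) (l : List Char) (h : l.Nodup) :
    cs.foldl pvRmA l = l.filter (fun x => decide (x ∉ cs)) := by
  induction cs generalizing l with
  | nil => simp
  | cons c cs ih =>
    have hnd : (l.erase c).Nodup := h.erase c
    have : List.foldl pvRmA l (c :: cs) = cs.foldl pvRmA (l.erase c) := by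
      simp [List.foldl, pvRmA_eq_erase]
    rw [this, ih _ hnd, h.erase_eq_filter c, List.filter_filter]
    apply List.filter_congr
    intro x _
    by_cases hx : x = c <;> by_cases hy : x ∈ cs <;> simp [hx, hy]

theorem missingCharacters_spec' (s : String) :
    missingCharacters s = missingCharacters_alt s := by
  simp only [missingCharacters, missingCharacters_alt]
  have hnum : (PySem.List.pyRange 0 10 1).map (fun i => Char.ofNat (48 + i.toNat))
      = "0123456789".toList := by decide
  have halph : "abcdefghijklmnopqrstuvwxyz".toList.foldl (fun acc c => acc ++ [c]) []
      = "abcdefghijklmnopqrstuvwxyz".toList := by decide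
  rw [hnum, halph, pvPairFold,
      pvFoldErase _ _ (by decide), pvFoldErase _ _ (by decide), ← List.filter_append]
  have hcat : "0123456789".toList ++ "abcdefghijklmnopqrstuvwxyz".toList
      = "0123456789abcdefghijklmnopqrstuvwxyz".toList := by decide
  rw [hcat]
  congr 1
  apply List.filter_congr
  intro x _
  by_cases hx : x ∈ s.toList
  · simp [hx, PySem.Set.mem_ofList]
  · simp [hx, PySem.Set.mem_ofList]

-- ===== VERDICT (by name: the statement is the Claim_ definition above) =====
theorem missingCharacters_spec : Claim_equal_missingCharacters := by
  intro s _
  exact missingCharacters_spec' s
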